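-- pv_equiv track=rewrite | github.com/akiasahi2008-hue/shisho-gijutsu | code/金史/strip_wiki_templates.py | _find_earliest
-- ===== SOURCE A (Python) =====
-- _SPECS: list[tuple[str, str]] = [
--     ("{{ProperNoun|", "inner"),
--     ("{{udots|", "inner"),
--     ("{{--|", "inner"),
--     ("{{-|", "inner"),
--     ("{{YL|", "inner"),
--     ("{{PUA|", "inner"),
--     ("{{*|", "inner"),
--     ("{{!|", "bang"),
--     ("{{?|", "inner"),
-- ]
--
-- def _find_earliest(s: str, start: int) -> tuple[int, str, str] | None:
--     """次のテンプレ開始位置、prefix、mode。無ければ None。"""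
--     best: tuple[int, int, str, str] | None = None  # j, -len(prefix), prefix, mode
--     for prefix, mode in _SPECS:
--         j = s.find(prefix, start)
--         if j < 0:
--             continue
--         key = (j, -len(prefix))
--         if best is None or key < (best[0], best[1]):
--             best = (j, -len(prefix), prefix, mode)
--     if best is None:
--         return None
--     return best[0], best[2], best[3]
-- ===== SOURCE B (Python) =====
-- _SPECS: list[tuple[str, str]] = [
--     ("{{ProperNoun|", "inner"),
--     ("{{udots|", "inner"),
--     ("{{--|", "inner"),
--     ("{{-|", "inner"),
--     ("{{YL|", "inner"),
--     ("{{PUA|", "inner"),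
--     ("{{*|", "inner"),
--     ("{{!|", "bang"),
--     ("{{?|", "inner"),
-- ]
--
-- # Longest prefix first, so at any position the longest matching prefix wins.
-- _ORDERED = sorted(_SPECS, key=lambda pm: -len(pm[0]))
--
-- def _find_earliest(s: str, start: int) -> tuple[int, str, str] | None:
--     """次のテンプレ開始位置、prefix、mode。無ければ None。"""
--     tail = s[start:]
--     offset = len(s) - len(tail)
--     for i in range(len(tail)):
--         for prefix, mode in _ORDERED:
--             if tail.startswith(prefix, i):
--                 return offset + i, prefix, mode
--     return None
-- ===== Notes on version B (the rewrite author's own statement) =====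
-- stated objective: alternative
-- what changed: Instead of running nine independent str.find scans and selecting the minimum (position, -len) key, B slices the tail s[start:] once and does a single left-to-right sweep over its positions with the specs sorted longest-prefix-first, returning at the first position where any prefix matches.
import Mathlib
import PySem

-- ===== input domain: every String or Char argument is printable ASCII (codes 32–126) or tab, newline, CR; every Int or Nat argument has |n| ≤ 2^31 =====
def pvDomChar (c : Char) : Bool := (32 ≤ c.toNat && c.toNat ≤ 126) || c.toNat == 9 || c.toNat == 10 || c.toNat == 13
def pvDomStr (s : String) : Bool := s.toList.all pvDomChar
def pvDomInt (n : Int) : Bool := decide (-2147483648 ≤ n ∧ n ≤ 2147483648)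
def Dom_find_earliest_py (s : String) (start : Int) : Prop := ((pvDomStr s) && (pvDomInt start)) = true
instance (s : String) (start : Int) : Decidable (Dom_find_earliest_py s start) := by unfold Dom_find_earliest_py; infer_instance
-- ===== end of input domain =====

-- B replaces A's nine independent str.find scans plus (position, -len) key-min
-- selection by slicing the tail once and sweeping it left to right (specs sorted
-- longest-prefix-first, first match wins); same return value, objective: alternative.

-- ===== PORT A =====
-- the module-level _SPECS table
def pvSpecs : List (String × String) := [
  ("{{ProperNoun|", "inner"),
  ("{{udots|", "inner"),
  ("{{--|", "inner"),
  ("{{-|", "inner"),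
  ("{{YL|", "inner"),
  ("{{PUA|", "inner"),
  ("{{*|", "inner"),
  ("{{!|", "bang"),
  ("{{?|", "inner")]

def find_earliest_py (s : String) (start : Int) : Option (Int × String × String) :=
  -- best carries (j, -len(prefix), prefix, mode); a spec replaces it when its
  -- key (j, -len(prefix)) is lexicographically smaller
  let best := pvSpecs.foldl (fun best pm =>
    let j := PySem.Str.findFrom s pm.1 start
    if j < 0 then best
    else
      match best with
      | none => some (j, -(PySem.Str.len pm.1), pm.1, pm.2)
      | some b =>
        if j < b.1 ∨ (j = b.1 ∧ -(PySem.Str.len pm.1) < b.2.1)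
        then some (j, -(PySem.Str.len pm.1), pm.1, pm.2) else b) none
  match best with
  | none => none
  | some b => some (b.1, b.2.2.1, b.2.2.2)

-- ===== PORT B =====
-- _ORDERED = sorted(_SPECS, key=lambda pm: -len(pm[0]))
def pvOrdered : List (String × String) :=
  PySem.List.sorted pvSpecs (fun pm => -(PySem.Str.len pm.1))

-- B's sweep over the tail: position i (in the original string), remaining
-- characters of the tail; tail.startswith(prefix, i) is checked on the suffix
-- (exact: both test the prefix at position i of the tail)
def pvScan (specs : List (String × String)) : Nat → List Char → Option (Int × String × String)
  | _, [] => none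
  | i, c :: rest =>
    match specs.find? (fun pm => PySem.Chars.startswith (c :: rest) pm.1.toList) with
    | some pm => some ((i : Int), pm.1, pm.2)
    | none => pvScan specs (i + 1) rest

def find_earliest_py_alt (s : String) (start : Int) : Option (Int × String × String) :=
  -- tail = s[start:]; offset = len(s) - len(tail)
  let tail := PySem.List.slice s.toList (some start) none
  let offset : Nat := s.toList.length - tail.length
  pvScan pvOrdered offset tail

-- ===== PRECONDITION & SPEC =====
def Spec_find_earliest_py (s : String) (start : Int) (out : Option (Int × String × String)) : Prop := out = find_earliest_py_alt s start
instance (s : String) (start : Int) (out : Option (Int × String × String)) : Decidable (Spec_find_earliest_py s start out) := by unfold Spec_find_earliest_py; infer_instance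

-- ===== CLAIM (what is proved, stated in full; the proofs are below) =====
def Claim_equal_find_earliest_py : Prop := ∀ (s : String) (start : Int), Dom_find_earliest_py s start → Spec_find_earliest_py s start (find_earliest_py s start)

-- ===== LEMMAS AND PROOFS =====

-- A's fold step, with positions taken relative to a suffix of the string
def pvStep0 (suffix : List Char) (best : Option (Int × Int × String × String))
    (pm : String × String) : Option (Int × Int × String × String) :=
  let j := PySem.Chars.find suffix pm.1.toList
  if j < 0 then best
  else
    match best with
    | none => some (j, -(PySem.Str.len pm.1), pm.1, pm.2)
    | some b =>
      if j < b.1 ∨ (j = b.1 ∧ -(PySem.Str.len pm.1) < b.2.1)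
      then some (j, -(PySem.Str.len pm.1), pm.1, pm.2) else b

-- A's fold step with every found position shifted by k
def pvStepK (k : Int) (suffix : List Char) (best : Option (Int × Int × String × String))
    (pm : String × String) : Option (Int × Int × String × String) :=
  let f := PySem.Chars.find suffix pm.1.toList
  let j := if f = -1 then -1 else k + f
  if j < 0 then best
  else
    match best with
    | none => some (j, -(PySem.Str.len pm.1), pm.1, pm.2)
    | some b =>
      if j < b.1 ∨ (j = b.1 ∧ -(PySem.Str.len pm.1) < b.2.1)
      then some (j, -(PySem.Str.len pm.1), pm.1, pm.2) else b

def pvShift (k : Int) (b : Int × Int × String × String) : Int × Int × String × String :=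
  (k + b.1, b.2)

def pvOut (i : Int) (b : Option (Int × Int × String × String)) : Option (Int × String × String) :=
  match b with
  | none => none
  | some b => some (i + b.1, b.2.2.1, b.2.2.2)


lemma pv_find_eq_zero_of_prefix {suffix p : List Char} (h : p <+: suffix) :
    PySem.Chars.find suffix p = 0 := by
  have hnn : 0 ≤ PySem.Chars.find suffix p := by
    rw [PySem.Chars.find_nonneg_iff]; exact h.isInfix
  obtain ⟨h1, h2⟩ := PySem.Chars.find_spec hnn
  by_contra hne
  have : (0:Nat) < (PySem.Chars.find suffix p).toNat := by omega
  exact h2 0 this (by simpa using h)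

lemma pv_prefix_of_find_eq_zero {suffix p : List Char}
    (h : PySem.Chars.find suffix p = 0) : p <+: suffix := by
  have hnn : 0 ≤ PySem.Chars.find suffix p := by omega
  have := (PySem.Chars.find_spec hnn).1
  rw [h] at this
  simpa using this

lemma pv_find_cons {c : Char} {rest p : List Char} (h : ¬ p <+: (c :: rest)) :
    PySem.Chars.find (c :: rest) p =
      if PySem.Chars.find rest p = -1 then -1 else 1 + PySem.Chars.find rest p := by
  by_cases hr : PySem.Chars.find rest p = -1
  · simp only [hr, if_pos]
    rw [PySem.Chars.find_eq_neg_one_iff] at hr ⊢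
    rw [List.infix_cons_iff]
    rintro (h1 | h2)
    · exact h h1
    · exact hr h2
  · simp only [hr]
    have hnn : 0 ≤ PySem.Chars.find rest p := by
      have := PySem.Chars.neg_one_le_find rest p; omega
    obtain ⟨hp1, hp2⟩ := PySem.Chars.find_spec hnn
    set j := (PySem.Chars.find rest p).toNat with hj
    clear_value j
    -- p matches c::rest at j+1
    have hmatch : p <+: List.drop (j + 1) (c :: rest) := by simpa using hp1
    have hnn2 : 0 ≤ PySem.Chars.find (c :: rest) p := by
      rw [PySem.Chars.find_nonneg_iff]
      exact hmatch.isInfix.trans (List.drop_suffix (j+1) (c :: rest)).isInfix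
    obtain ⟨hq1, hq2⟩ := PySem.Chars.find_spec hnn2
    set f := (PySem.Chars.find (c :: rest) p).toNat with hf
    clear_value f
    have hfle : f ≤ j + 1 := by
      by_contra hgt
      exact hq2 (j+1) (by omega) hmatch
    have hfne : f ≠ 0 := by
      intro h0
      apply h
      have := hq1
      rw [h0] at this
      simpa using this
    have hjle : j ≤ f - 1 := by
      by_contra hgt
      apply hp2 (f - 1) (by omega)
      have : p <+: List.drop f (c :: rest) := hq1
      rw [show List.drop f (c :: rest) = List.drop (f-1) rest by
        obtain ⟨m, hm⟩ := Nat.exists_eq_add_of_le (Nat.one_le_iff_ne_zero.mpr hfne)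
        rw [hm, Nat.add_comm, List.drop_succ_cons]
        simp] at this
      exact this
    have hfj : f = j + 1 := by omega
    have e1 := Int.toNat_of_nonneg hnn2
    have e2 := Int.toNat_of_nonneg hnn
    rw [← e1, ← e2, ← hf, ← hj, hfj]
    push_cast
    ring

lemma pvFold_shift (k : Int) (hk : 0 ≤ k) (suffix : List Char) :
    ∀ (l : List (String × String)) (acc : Option (Int × Int × String × String)),
      List.foldl (pvStepK k suffix) (acc.map (pvShift k)) l =
        (List.foldl (pvStep0 suffix) acc l).map (pvShift k) := by
  intro l
  induction l with
  | nil => intro acc; simp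
  | cons pm l ih =>
    intro acc
    simp only [List.foldl_cons]
    have hstep : pvStepK k suffix (acc.map (pvShift k)) pm = (pvStep0 suffix acc pm).map (pvShift k) := by
      have hge := PySem.Chars.neg_one_le_find suffix pm.1.toList
      simp only [pvStepK, pvStep0]
      by_cases hneg : PySem.Chars.find suffix pm.1.toList = -1
      · simp [hneg]
      · have hpos : 0 ≤ PySem.Chars.find suffix pm.1.toList := by omega
        simp only [hneg, if_false]
        have h1 : ¬ (k + PySem.Chars.find suffix pm.1.toList < 0) := by omega
        have h2 : ¬ (PySem.Chars.find suffix pm.1.toList < 0) := by omega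
        simp only [h1, h2, if_false]
        cases acc with
        | none => simp [pvShift]
        | some b =>
          simp only [Option.map_some, pvShift]
          have hlt : (k + PySem.Chars.find suffix pm.1.toList < k + b.1) ↔
              (PySem.Chars.find suffix pm.1.toList < b.1) := by omega
          have heq : (k + PySem.Chars.find suffix pm.1.toList = k + b.1) ↔
              (PySem.Chars.find suffix pm.1.toList = b.1) := by omega
          by_cases hc : PySem.Chars.find suffix pm.1.toList < b.1 ∨
              (PySem.Chars.find suffix pm.1.toList = b.1 ∧ -(PySem.Str.len pm.1) < b.2.1)
          · rw [if_pos hc, if_pos (by rcases hc with h | ⟨h, h'⟩; exact Or.inl (by omega); exact Or.inr ⟨by omega, h'⟩)]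
            simp [pvShift]
          · rw [if_neg hc, if_neg (by rw [hlt, heq]; exact hc)]
            simp [pvShift]
    rw [hstep, ih]


lemma pvFold_keep (suffix : List Char) (b : Int × Int × String × String) :
    ∀ (l : List (String × String)),
      (∀ pm ∈ l, 0 ≤ PySem.Chars.find suffix pm.1.toList →
        ¬(PySem.Chars.find suffix pm.1.toList < b.1 ∨
          (PySem.Chars.find suffix pm.1.toList = b.1 ∧ -(PySem.Str.len pm.1) < b.2.1))) →
      List.foldl (pvStep0 suffix) (some b) l = some b := by
  intro l
  induction l with
  | nil => intro _; simp
  | cons pm l ih =>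
    intro h
    simp only [List.foldl_cons]
    have hstep : pvStep0 suffix (some b) pm = some b := by
      dsimp only [pvStep0]
      split_ifs with h1 h2
      · rfl
      · exact absurd h2 (h pm List.mem_cons_self (by omega))
      · rfl
    rw [hstep]
    exact ih (fun pm' hm => h pm' (List.mem_cons_of_mem _ hm))

lemma pvFold_min (suffix : List Char) (pm₀ : String × String)
    (h₀ : PySem.Chars.find suffix pm₀.1.toList = 0) :
    ∀ (l : List (String × String)) (acc : Option (Int × Int × String × String)),
      pm₀ ∈ l →
      (∀ pm ∈ l, 0 ≤ PySem.Chars.find suffix pm.1.toList →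
        0 < PySem.Chars.find suffix pm.1.toList ∨
        (PySem.Chars.find suffix pm.1.toList = 0 ∧ PySem.Str.len pm.1 ≤ PySem.Str.len pm₀.1)) →
      (∀ pm ∈ l, PySem.Chars.find suffix pm.1.toList = 0 →
        PySem.Str.len pm.1 = PySem.Str.len pm₀.1 → pm = pm₀) →
      (∀ b, acc = some b → b = (0, -(PySem.Str.len pm₀.1), pm₀.1, pm₀.2) ∨
        0 < b.1 ∨ (b.1 = 0 ∧ -(PySem.Str.len pm₀.1) < b.2.1)) →
      List.foldl (pvStep0 suffix) acc l = some (0, -(PySem.Str.len pm₀.1), pm₀.1, pm₀.2) := by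
  intro l
  induction l with
  | nil => intro acc hmem; exact absurd hmem (List.not_mem_nil)
  | cons pm l ih =>
    intro acc hmem hle heq hacc
    simp only [List.foldl_cons]
    rcases List.mem_cons.mp hmem with hpm | hmem'
    · -- pm₀ = pm : the accumulator becomes e₀, then stays
      subst hpm
      have hstep : pvStep0 suffix acc pm₀ = some (0, -(PySem.Str.len pm₀.1), pm₀.1, pm₀.2) := by
        cases acc with
        | none =>
          dsimp only [pvStep0]
          rw [h₀, if_neg (by omega)]
        | some b =>
          dsimp only [pvStep0]
          rw [h₀, if_neg (by omega)]
          rcases hacc b rfl with hb | hb | ⟨hb1, hb2⟩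
          · rw [if_neg (by rw [hb]; dsimp only; omega), hb]
          · rw [if_pos (Or.inl hb)]
          · rw [if_pos (Or.inr ⟨hb1.symm, hb2⟩)]
      rw [hstep]
      apply pvFold_keep
      intro pm hm hge
      rcases hle pm (List.mem_cons_of_mem _ hm) hge with hgt | ⟨hf0, hlen⟩
      · dsimp only
        rw [not_or]
        exact ⟨by omega, by rintro ⟨hf, _⟩; omega⟩
      · dsimp only
        rw [not_or]
        exact ⟨by omega, by rintro ⟨_, hlt⟩; omega⟩
    · -- pm₀ is in the tail: one step preserves the accumulator invariant
      apply ih _ hmem' (fun pm' hm => hle pm' (List.mem_cons_of_mem _ hm))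
        (fun pm' hm => heq pm' (List.mem_cons_of_mem _ hm))
      intro b hb
      have hbpm : 0 ≤ PySem.Chars.find suffix pm.1.toList →
          b = (PySem.Chars.find suffix pm.1.toList, -(PySem.Str.len pm.1), pm.1, pm.2) →
          b = (0, -(PySem.Str.len pm₀.1), pm₀.1, pm₀.2) ∨ 0 < b.1 ∨ (b.1 = 0 ∧ -(PySem.Str.len pm₀.1) < b.2.1) := by
        intro hge hbe
        rcases hle pm List.mem_cons_self hge with hgt | ⟨hf0, hlen⟩
        · right; left; rw [hbe]; exact hgt
        · by_cases hl : PySem.Str.len pm.1 = PySem.Str.len pm₀.1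
          · left
            have hpp := heq pm List.mem_cons_self hf0 hl
            rw [hbe, hpp, h₀]
          · right; right
            rw [hbe]
            exact ⟨hf0, by dsimp only; omega⟩
      cases acc with
      | none =>
        dsimp only [pvStep0] at hb
        split_ifs at hb with h1
        exact hbpm (by omega) (Option.some_injective _ hb.symm)
      | some b' =>
        dsimp only [pvStep0] at hb
        split_ifs at hb with h1 h2
        · exact hacc b hb
        · exact hbpm (by omega) (Option.some_injective _ hb.symm)
        · exact hacc b hb

lemma pv_find?_first_max {α : Type} (key : α → Int) (p : α → Bool) :
    ∀ (l : List α) (a : α), l.Pairwise (fun x y => key y ≤ key x) →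
      l.find? p = some a → ∀ x ∈ l, p x = true → key x ≤ key a := by
  intro l
  induction l with
  | nil => intro a _ h; simp at h
  | cons y l ih =>
    intro a hpw hf x hx hp
    rw [List.pairwise_cons] at hpw
    by_cases hy : p y = true
    · rw [List.find?_cons_of_pos hy] at hf
      have : y = a := by simpa using hf
      subst this
      rcases List.mem_cons.mp hx with rfl | hx'
      · exact le_refl _
      · exact hpw.1 x hx'
    · rw [List.find?_cons_of_neg (by simpa using hy)] at hf
      rcases List.mem_cons.mp hx with rfl | hx'
      · exact absurd hp hy
      · exact ih a hpw.2 hf x hx' hp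

set_option maxHeartbeats 1000000 in
lemma pvMain (suffix : List Char) :
    ∀ (i : Nat), pvOut (i : Int) (List.foldl (pvStep0 suffix) none pvSpecs) =
      pvScan pvOrdered i suffix := by
  induction suffix with
  | nil =>
    intro i
    have h : List.foldl (pvStep0 []) none pvSpecs = none := by decide
    rw [h]
    rfl
  | cons c rest ih =>
    intro i
    cases hf : pvOrdered.find? (fun pm => PySem.Chars.startswith (c :: rest) pm.1.toList) with
    | none =>
      have hnp : ∀ pm ∈ pvSpecs, ¬ pm.1.toList <+: (c :: rest) := by
        intro pm hm hp
        have hmo : pm ∈ pvOrdered := (PySem.List.mem_sorted _ _ _ pm).mpr hm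
        have := List.find?_eq_none.mp hf pm hmo
        exact this ((PySem.Chars.startswith_iff _ _).mpr hp)
      have hcongr : List.foldl (pvStep0 (c :: rest)) none pvSpecs
          = List.foldl (pvStepK 1 rest) none pvSpecs := by
        apply PySem.List.foldl_congr_mem
        intro acc pm hm
        dsimp only [pvStep0, pvStepK]
        rw [pv_find_cons (hnp pm hm)]
      rw [hcongr]
      have hsh := pvFold_shift 1 (by omega) rest pvSpecs none
      simp only [Option.map_none] at hsh
      rw [hsh]
      have hout : ∀ x, pvOut (i : Int) (x.map (pvShift 1)) = pvOut ((i + 1 : Nat) : Int) x := by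
        intro x
        cases x with
        | none => rfl
        | some b => simp only [Option.map_some, pvOut, pvShift]; congr 1; push_cast; ring_nf
      rw [hout, ih (i + 1)]
      simp only [pvScan]
      rw [hf]
    | some pm₀ =>
      have hsw := List.find?_some hf
      have hpref : pm₀.1.toList <+: (c :: rest) := (PySem.Chars.startswith_iff _ _).mp hsw
      have h₀ : PySem.Chars.find (c :: rest) pm₀.1.toList = 0 := pv_find_eq_zero_of_prefix hpref
      have hmem : pm₀ ∈ pvSpecs := (PySem.List.mem_sorted _ _ _ pm₀).mp (List.mem_of_find?_eq_some hf)
      have hmax : ∀ pm ∈ pvSpecs, pm.1.toList <+: (c :: rest) →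
          PySem.Str.len pm.1 ≤ PySem.Str.len pm₀.1 := by
        intro pm hm hp
        have hpw : pvOrdered.Pairwise (fun x y => PySem.Str.len y.1 ≤ PySem.Str.len x.1) := by
          have := PySem.List.sorted_pairwise pvSpecs (fun pm => -(PySem.Str.len pm.1))
          exact this.imp (fun h => by omega)
        exact pv_find?_first_max (fun pm => PySem.Str.len pm.1) _ pvOrdered pm₀ hpw hf pm
          ((PySem.List.mem_sorted _ _ _ pm).mpr hm) ((PySem.Chars.startswith_iff _ _).mpr hp)
      have hle : ∀ pm ∈ pvSpecs, 0 ≤ PySem.Chars.find (c :: rest) pm.1.toList →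
          0 < PySem.Chars.find (c :: rest) pm.1.toList ∨
          (PySem.Chars.find (c :: rest) pm.1.toList = 0 ∧ PySem.Str.len pm.1 ≤ PySem.Str.len pm₀.1) := by
        intro pm hm hge
        by_cases h0' : PySem.Chars.find (c :: rest) pm.1.toList = 0
        · exact Or.inr ⟨h0', hmax pm hm (pv_prefix_of_find_eq_zero h0')⟩
        · exact Or.inl (by omega)
      have heq : ∀ pm ∈ pvSpecs, PySem.Chars.find (c :: rest) pm.1.toList = 0 →
          PySem.Str.len pm.1 = PySem.Str.len pm₀.1 → pm = pm₀ := by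
        intro pm hm hf0 hlen
        have hp : pm.1.toList <+: (c :: rest) := pv_prefix_of_find_eq_zero hf0
        have hlist : pm.1.toList = pm₀.1.toList := by
          have e1 := List.prefix_iff_eq_take.mp hp
          have e2 := List.prefix_iff_eq_take.mp hpref
          rw [e1, e2]
          congr 1
          have l1 := PySem.Str.len_eq pm.1
          have l2 := PySem.Str.len_eq pm₀.1
          omega
        have huniq : ∀ x ∈ pvSpecs, ∀ y ∈ pvSpecs, x.1.toList = y.1.toList → x = y := by decide
        exact huniq pm hm pm₀ hmem hlist
      rw [pvFold_min (c :: rest) pm₀ h₀ pvSpecs none hmem hle heq (by intro b h; simp at h)]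
      simp only [pvScan]
      rw [hf]
      simp [pvOut]

lemma pv_findFrom_clamp (cs p : List Char) (start : Int) :
    PySem.Chars.findFrom cs p start =
      PySem.Chars.findFrom cs p
        (if start < 0 then (if start + cs.length < 0 then 0 else start + cs.length) else start) := by
  dsimp only [PySem.Chars.findFrom]
  split_ifs <;> first | rfl | omega

lemma pv_findFrom_big (cs p : List Char) (start : Int) (h : (cs.length : Int) < start)
    (h0 : 0 ≤ start) : PySem.Chars.findFrom cs p start = -1 := by
  dsimp only [PySem.Chars.findFrom]
  split_ifs <;> first | rfl | omega

lemma pv_clampIdx_eq (n : Nat) (a : Int) :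
    (PySem.List.clampIdx n a : Int) =
      min (if a < 0 then (if a + n < 0 then 0 else a + n) else a) n := by
  dsimp [PySem.List.clampIdx]
  split_ifs <;> omega

lemma pvFoldl_const {α β : Type} : ∀ (l : List α) (a : β), List.foldl (fun a _ => a) a l = a := by
  intro l
  induction l with
  | nil => intro a; rfl
  | cons x l ih => intro a; simp only [List.foldl_cons]; exact ih a

-- ===== VERDICT (by name: the statement is the Claim_ definition above) =====
set_option maxHeartbeats 1000000 in
theorem find_earliest_py_spec : Claim_equal_find_earliest_py := by
  intro s start _
  unfold Spec_find_earliest_py find_earliest_py find_earliest_py_alt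
  dsimp only
  -- B's tail and offset
  rw [PySem.List.slice_some_none]
  set k := PySem.List.clampIdx s.toList.length start with hkdef
  have hck := pv_clampIdx_eq s.toList.length start
  have hk : k ≤ s.toList.length := by omega
  have hoff : s.toList.length - (s.toList.drop k).length = k := by
    rw [List.length_drop]; omega
  rw [hoff]
  by_cases hbig : (s.toList.length : Int) <
      (if start < 0 then (if start + s.toList.length < 0 then 0 else start + s.toList.length) else start)
  · -- start beyond the end of the string: both sides give none
    have hst : ¬ start < 0 ∧ (s.toList.length : Int) < start := by
      constructor
      · intro hneg
        rw [if_pos hneg] at hbig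
        split_ifs at hbig <;> omega
      · by_cases hneg : start < 0
        · rw [if_pos hneg] at hbig; split_ifs at hbig <;> omega
        · rwa [if_neg hneg] at hbig
    have hA : List.foldl (fun best (pm : String × String) =>
        let j := PySem.Str.findFrom s pm.1 start
        if j < 0 then best
        else
          match best with
          | none => some (j, -(PySem.Str.len pm.1), pm.1, pm.2)
          | some b =>
            if j < b.1 ∨ (j = b.1 ∧ -(PySem.Str.len pm.1) < b.2.1)
            then some (j, -(PySem.Str.len pm.1), pm.1, pm.2) else b)
        (none : Option (Int × Int × String × String)) pvSpecs = none := by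
      rw [PySem.List.foldl_congr_mem pvSpecs _ (fun a _ => a) none ?h, pvFoldl_const]
      intro acc pm _
      have hneg : PySem.Str.findFrom s pm.1 start = -1 := by
        rw [PySem.Str.findFrom_eq]
        exact pv_findFrom_big _ _ _ hst.2 (by omega)
      dsimp only
      rw [hneg, if_pos (by omega)]
    rw [hA]
    have hkn : k = s.toList.length := by omega
    have hdrop : s.toList.drop k = [] := List.drop_eq_nil_of_le (by omega)
    rw [hdrop]
    rfl
  · -- the clamped start equals k, a valid index k ≤ n
    have hkeq : (k : Int) =
        (if start < 0 then (if start + s.toList.length < 0 then 0 else start + s.toList.length) else start) := by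
      rw [hck]
      split_ifs at hbig ⊢ <;> omega
    have hA : List.foldl (fun best (pm : String × String) =>
        let j := PySem.Str.findFrom s pm.1 start
        if j < 0 then best
        else
          match best with
          | none => some (j, -(PySem.Str.len pm.1), pm.1, pm.2)
          | some b =>
            if j < b.1 ∨ (j = b.1 ∧ -(PySem.Str.len pm.1) < b.2.1)
            then some (j, -(PySem.Str.len pm.1), pm.1, pm.2) else b)
        (none : Option (Int × Int × String × String)) pvSpecs
        = List.foldl (pvStepK (k : Int) (s.toList.drop k)) none pvSpecs := by
      apply PySem.List.foldl_congr_mem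
      intro acc pm _
      have hj : PySem.Str.findFrom s pm.1 start =
          (if PySem.Chars.find (s.toList.drop k) pm.1.toList = -1 then -1
           else (k : Int) + PySem.Chars.find (s.toList.drop k) pm.1.toList) := by
        rw [PySem.Str.findFrom_eq, pv_findFrom_clamp, ← hkeq,
          PySem.Chars.findFrom_natCast s.toList pm.1.toList k hk]
      dsimp only [pvStepK]
      rw [hj]
    rw [hA]
    have hsh := pvFold_shift (k : Int) (by omega) (s.toList.drop k) pvSpecs none
    simp only [Option.map_none] at hsh
    rw [hsh]
    have := pvMain (s.toList.drop k) k
    rw [← this]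
    cases List.foldl (pvStep0 (s.toList.drop k)) none pvSpecs with
    | none => rfl
    | some b => rfl
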